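-- pv_equiv track=rewrite | github.com/scaralbi/MV_Resistance | Scripts/GenSeqRefViewer.py | adjust_positions
-- ===== SOURCE A (Python) =====
-- def adjust_positions(positions, min_distance):
--     """
--     Adjust positions to ensure a minimum distance between each position so that mutated gene labels do not overlap
--
--     Parameters:
--         positions (list): List of positions, sorted in ascending order
--         min_distance (int): Minimum distance that should be between each position
--
--     Returns:
--         new_positions (list): List of adjusted positions
--     """
--     new_positions = positions.copy()
--     for i in range(len(new_positions) - 1):
--         # Check if distance to next position is less than min_distance
--         if new_positions[i + 1] - new_positions[i] < min_distance:
--             # Adjust next position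
--             new_positions[i + 1] = new_positions[i] + min_distance
--
--     # We need to iterate until no more adjustments are needed,
--     # because an adjustment can cause a position to encroach on its next neighbor.
--     # If we make any adjustments, we'll run the loop again.
--     if new_positions != positions:
--         new_positions = adjust_positions(new_positions, min_distance)
--
--     return new_positions
-- ===== SOURCE B (Python) =====
-- def adjust_positions(positions, min_distance):
--     """Single forward pass tracking the last placed position (no mutation/recursion)."""
--     if not positions:
--         return []
--     last = positions[0]
--     result = [last]
--     for p in positions[1:]:
--         last = p if p - last >= min_distance else last + min_distance
--         result.append(last)
--     return result
-- ===== Notes on version B (the rewrite author's own statement) =====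
-- stated objective: simpler
-- what changed: Replaced the mutate-copy-and-recurse-to-fixpoint scheme (with an equality re-check each round) by one forward pass that tracks the last placed position in an accumulator; one pass already yields the fixpoint.
import Mathlib
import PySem

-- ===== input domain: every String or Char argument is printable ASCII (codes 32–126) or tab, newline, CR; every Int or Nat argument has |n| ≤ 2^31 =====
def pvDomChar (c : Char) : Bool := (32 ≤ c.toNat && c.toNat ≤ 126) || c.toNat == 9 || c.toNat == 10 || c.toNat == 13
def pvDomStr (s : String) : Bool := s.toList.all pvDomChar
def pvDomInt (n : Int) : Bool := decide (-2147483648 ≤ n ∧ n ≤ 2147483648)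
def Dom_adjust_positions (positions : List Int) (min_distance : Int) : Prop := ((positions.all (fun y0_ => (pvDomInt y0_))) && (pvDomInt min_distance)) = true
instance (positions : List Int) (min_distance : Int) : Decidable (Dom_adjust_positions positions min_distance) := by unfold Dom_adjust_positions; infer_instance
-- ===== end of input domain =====

-- B replaces A's mutate-and-recurse-to-fixpoint by a single forward pass with a 'last' accumulator (simpler; return value only, A does not mutate its argument).

-- ===== PORT A =====
-- The in-place index loop 'for i in range(len-1): if a[i+1]-a[i] < d: a[i+1] = a[i]+d'
-- transcribed positionally: each step rewrites the next cell from the current one and moves on.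
def onePassA (xs : List Int) (d : Int) : List Int :=
  match xs with
  | [] => []
  | [x] => [x]
  | x :: y :: rest =>
    x :: onePassA ((if y - x < d then x + d else y) :: rest) d
termination_by xs.length
decreasing_by simp

-- fixpoint facts needed by adjust_positions' termination argument (cited in decreasing_by)
theorem onePassA_cons_shape (z : Int) (l : List Int) (d : Int) :
    ∃ t, onePassA (z :: l) d = z :: t := by
  cases l with
  | nil => exact ⟨[], by rw [onePassA]⟩
  | cons w ws => exact ⟨_, by rw [onePassA]⟩

theorem onePassA_fixed (xs : List Int) (d : Int)
    (h : List.IsChain (fun a b => d ≤ b - a) xs) : onePassA xs d = xs := by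
  induction xs using onePassA.induct d with
  | case1 => rw [onePassA]
  | case2 x => rw [onePassA]
  | case3 x y rest ih =>
    simp only [dite_eq_ite] at ih
    rw [List.isChain_cons_cons] at h
    have hcond : ¬ (y - x < d) := by omega
    rw [if_neg hcond] at ih
    rw [onePassA, if_neg hcond, ih h.2]

theorem onePassA_chain (xs : List Int) (d : Int) :
    List.IsChain (fun a b => d ≤ b - a) (onePassA xs d) := by
  induction xs using onePassA.induct d with
  | case1 => rw [onePassA]; exact List.IsChain.nil
  | case2 x => rw [onePassA]; simp
  | case3 x y rest ih =>
    simp only [dite_eq_ite] at ih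
    rw [onePassA]
    obtain ⟨t, ht⟩ := onePassA_cons_shape (if y - x < d then x + d else y) rest d
    rw [ht] at ih ⊢
    rw [List.isChain_cons_cons]
    exact ⟨by split_ifs with hc <;> omega, ih⟩

theorem onePassA_idem (xs : List Int) (d : Int) :
    onePassA (onePassA xs d) d = onePassA xs d :=
  onePassA_fixed _ _ (onePassA_chain xs d)

def adjust_positions (positions : List Int) (min_distance : Int) : List Int :=
  -- new_positions := copy + in-place loop (onePassA); recurse until no change
  let np := onePassA positions min_distance
  if np = positions then np else adjust_positions np min_distance
termination_by (if onePassA positions min_distance = positions then 0 else 1 : Nat)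
decreasing_by
  rename_i h
  rw [if_pos (onePassA_idem positions min_distance), if_neg h]
  omega

-- ===== PORT B =====
-- Source B: result list + running 'last'; the for-loop is the foldl, append is ++ [·].
def adjust_positions_alt (positions : List Int) (min_distance : Int) : List Int :=
  match positions with
  | [] => []
  | p0 :: rest =>
    (rest.foldl (fun st p =>
        let last := if p - st.2 ≥ min_distance then p else st.2 + min_distance
        (st.1 ++ [last], last)) ([p0], p0)).1

-- ===== PRECONDITION & SPEC =====
def Spec_adjust_positions (positions : List Int) (min_distance : Int) (out : List Int) : Prop := out = adjust_positions_alt positions min_distance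
instance (positions : List Int) (min_distance : Int) (out : List Int) : Decidable (Spec_adjust_positions positions min_distance out) := by unfold Spec_adjust_positions; infer_instance

-- ===== CLAIM (what is proved, stated in full; the proofs are below) =====
def Claim_equal_adjust_positions : Prop := ∀ (positions : List Int) (min_distance : Int), Dom_adjust_positions positions min_distance → Spec_adjust_positions positions min_distance (adjust_positions positions min_distance)

-- ===== LEMMAS AND PROOFS =====

theorem foldl_fst_append (d : Int) (rest a b : List Int) (l : Int) :
    (rest.foldl (fun st p =>
        let last := if p - st.2 ≥ d then p else st.2 + d
        (st.1 ++ [last], last)) (a ++ b, l)).1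
    = a ++ (rest.foldl (fun st p =>
        let last := if p - st.2 ≥ d then p else st.2 + d
        (st.1 ++ [last], last)) (b, l)).1 := by
  induction rest generalizing b l with
  | nil => rfl
  | cons p rest ih =>
    simp only [List.foldl_cons]
    rw [List.append_assoc a b]
    exact ih _ _

theorem alt_eq_onePassA (xs : List Int) (d : Int) :
    adjust_positions_alt xs d = onePassA xs d := by
  induction xs using onePassA.induct d with
  | case1 => rw [onePassA]; rfl
  | case2 x => rw [onePassA]; rfl
  | case3 x y rest ih =>
    simp only [dite_eq_ite] at ih
    rw [onePassA]
    set y' := if y - x < d then x + d else y with hy'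
    have hstep : (if y - x ≥ d then y else x + d) = y' := by
      rw [hy']; split_ifs <;> omega
    calc adjust_positions_alt (x :: y :: rest) d
        = (rest.foldl (fun st p =>
            let last := if p - st.2 ≥ d then p else st.2 + d
            (st.1 ++ [last], last)) ([x] ++ [y'], y')).1 := by
          simp only [adjust_positions_alt, List.foldl_cons, hstep]
      _ = [x] ++ (rest.foldl (fun st p =>
            let last := if p - st.2 ≥ d then p else st.2 + d
            (st.1 ++ [last], last)) ([y'], y')).1 := foldl_fst_append d rest [x] [y'] y'
      _ = [x] ++ adjust_positions_alt (y' :: rest) d := rfl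
      _ = x :: onePassA (y' :: rest) d := by rw [ih]; rfl

theorem adjust_eq_onePassA (xs : List Int) (d : Int) :
    adjust_positions xs d = onePassA xs d := by
  rw [adjust_positions]
  split_ifs with h
  · rfl
  · rw [adjust_positions, if_pos (onePassA_idem xs d)]
    exact onePassA_idem xs d

-- ===== VERDICT (by name: the statement is the Claim_ definition above) =====
theorem adjust_positions_spec : Claim_equal_adjust_positions := by
  intro positions min_distance _
  unfold Spec_adjust_positions
  rw [adjust_eq_onePassA, alt_eq_onePassA]
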